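-- pv_equiv track=rewrite | github.com/dugu9sword/spa-dp | graph/Algorithms.py | get_right_most_child
-- ===== SOURCE A (Python) =====
-- def get_right_most_child(tree_matrix, head, avoid):
--     p = len(tree_matrix) - 1
--     while p > head:
--         if p == avoid:
--             p -= 1
--         else:
--             if tree_matrix[p][head] != -1:
--                 return p
--         p -= 1
--     return -1
-- ===== SOURCE B (Python) =====
-- def get_right_most_child(tree_matrix, head, avoid):
--     n = len(tree_matrix)
--
--     def cell(p):
--         if not (-n <= p < n):
--             return -1
--         row = tree_matrix[p]
--         if not (-len(row) <= head < len(row)):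
--             return -1
--         return row[head]
--
--     candidates = [p for p in range(head + 1, n)
--                   if p != avoid and cell(p) != -1]
--     return max(candidates, default=-1)
-- ===== Notes on version B (the rewrite author's own statement) =====
-- stated objective: alternative
-- what changed: Replaces the descending while-loop with early return (and its double-decrement skip) by a single comprehension collecting all candidate child rows (a missing cell counts as no child) and taking their maximum with default -1; this also fixes A's off-by-one that silently skips row avoid-1.
-- intended difference: On inputs where the rightmost child row is exactly avoid-1 (avoid != 0, head < avoid-1 < len(tree_matrix), no child row above it), A's double decrement skips that row and returns a smaller child index or -1, while B returns avoid-1, the intended rightmost child since A's code only meant to skip row avoid itself. — e.g. on get_right_most_child([[-1], [7], [-1]], 0, 2): A returns -1, B returns 1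
import Mathlib
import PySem

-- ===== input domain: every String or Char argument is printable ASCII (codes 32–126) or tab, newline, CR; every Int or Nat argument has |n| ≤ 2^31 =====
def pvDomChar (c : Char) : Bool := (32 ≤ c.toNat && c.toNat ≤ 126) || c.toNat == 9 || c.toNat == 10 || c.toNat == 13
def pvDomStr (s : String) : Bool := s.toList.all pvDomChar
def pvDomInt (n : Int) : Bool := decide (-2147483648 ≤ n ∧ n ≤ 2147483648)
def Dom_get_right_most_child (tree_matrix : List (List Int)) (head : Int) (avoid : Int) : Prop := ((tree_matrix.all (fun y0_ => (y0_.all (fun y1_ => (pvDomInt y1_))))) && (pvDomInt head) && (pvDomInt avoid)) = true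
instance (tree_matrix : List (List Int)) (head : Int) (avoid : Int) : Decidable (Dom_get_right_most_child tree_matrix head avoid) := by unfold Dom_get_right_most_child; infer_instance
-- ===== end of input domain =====

-- B replaces A's early-returning descending while-loop (whose double decrement on p == avoid also skips
-- row avoid-1) by a comprehension over all candidate rows (missing cells count as no-child) followed by
-- max: an alternative total formulation; it fixes A's avoid-1 off-by-one (see D_ below).


-- ===== PORT A =====
-- tree_matrix[p][head] != -1 with out-of-range reads defaulted to -1 (Source B's 'cell'); wherever Pre_ holds
-- the defaults never fire, so A's port is exact there (Python A raises exactly where a pyGet? is none)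
def pvHit (tree_matrix : List (List Int)) (head : Int) (p : Int) : Bool :=
  PySem.List.pyGetD (PySem.List.pyGetD tree_matrix p []) head (-1) != -1

-- the while-loop of A: p counts down; on p == avoid it is decremented twice (A's code does p -= 1 in the branch AND at the bottom)
def pvGoA (tree_matrix : List (List Int)) (head avoid p : Int) : Int :=
  if _h : head < p then
    if p = avoid then pvGoA tree_matrix head avoid (p - 2)
    else if pvHit tree_matrix head p then p
    else pvGoA tree_matrix head avoid (p - 1)
  else -1
termination_by (p - head).toNat
decreasing_by all_goals omega

def get_right_most_child (tree_matrix : List (List Int)) (head : Int) (avoid : Int) : Int :=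
  pvGoA tree_matrix head avoid ((tree_matrix.length : Int) - 1)

-- ===== PORT B =====
-- Source B: candidates = [p for p in range(head+1, n) if p != avoid and cell(p) != -1]; max(candidates, default=-1)
def get_right_most_child_alt (tree_matrix : List (List Int)) (head : Int) (avoid : Int) : Int :=
  let candidates := (PySem.List.pyRange (head + 1) (tree_matrix.length : Int) 1).filter
      (fun p => p != avoid && pvHit tree_matrix head p)
  match PySem.List.max? candidates (fun x => x) with
  | some m => m
  | none => -1

-- ===== PRECONDITION & SPEC =====
-- cell tm[p][head] is readable without IndexError (possibly negative, Python-wrapped indices)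
def pvIdx (tree_matrix : List (List Int)) (head : Int) (p : Int) : Bool :=
  ((PySem.List.pyGet? tree_matrix p).bind (fun row => PySem.List.pyGet? row head)).isSome

-- row p is one A's scan never reads because of the double decrement at p == avoid
def pvSkip (tree_matrix : List (List Int)) (avoid : Int) (p : Int) : Prop :=
  p = avoid - 1 ∧ avoid < (tree_matrix.length : Int)

-- Pre_ excludes EXACTLY the inputs on which Python A raises IndexError: some row A's descending scan
-- reads (p ≠ avoid, not the skipped row avoid-1) has no cell at [p][head] and no hit above it stops the
-- scan first.  On every input where A returns, Pre_ holds.  The scanned indices below -len (all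
-- unreadable) are summarised by the arithmetic second conjunct instead of being enumerated.
def Pre_get_right_most_child (tree_matrix : List (List Int)) (head : Int) (avoid : Int) : Prop :=
  (∀ p ∈ PySem.List.pyRange (max (head + 1) (-(tree_matrix.length : Int))) (tree_matrix.length : Int) 1,
     p ≠ avoid → ¬ pvSkip tree_matrix avoid p →
       (pvIdx tree_matrix head p = true ∨
        ∃ q ∈ PySem.List.pyRange (max (head + 1) (-(tree_matrix.length : Int))) (tree_matrix.length : Int) 1,
          p < q ∧ q ≠ avoid ∧ ¬ pvSkip tree_matrix avoid q ∧ pvHit tree_matrix head q = true)) ∧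
  (-(tree_matrix.length : Int) - (head + 1) >
     ((if head + 1 ≤ avoid ∧ avoid < -(tree_matrix.length : Int) then (1 : Int) else 0) +
      (if avoid < (tree_matrix.length : Int) ∧ head + 1 ≤ avoid - 1 ∧ avoid - 1 < -(tree_matrix.length : Int) then (1 : Int) else 0)) →
   ∃ q ∈ PySem.List.pyRange (max (head + 1) (-(tree_matrix.length : Int))) (tree_matrix.length : Int) 1,
     q ≠ avoid ∧ ¬ pvSkip tree_matrix avoid q ∧ pvHit tree_matrix head q = true)
instance (tree_matrix : List (List Int)) (head : Int) (avoid : Int) : Decidable (Pre_get_right_most_child tree_matrix head avoid) := by unfold Pre_get_right_most_child pvSkip; infer_instance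
def pvWitness_get_right_most_child : List (List Int) × Int × Int := ([[-1], [0], [1]], 0, 5)

-- On inputs where the rightmost child row is exactly avoid-1 (head < avoid-1, avoid < len, no child row
-- above it, avoid ≠ 0 — at avoid = 0 the wrap-around makes both sides return -1 under Pre_), A's double
-- decrement skips that row and returns a smaller child index or -1, while B returns avoid-1, the intended
-- rightmost child: A's code only meant to skip row avoid itself.
def D_get_right_most_child (tree_matrix : List (List Int)) (head : Int) (avoid : Int) : Prop :=
  avoid ≠ 0 ∧ head < avoid - 1 ∧ avoid < PySem.List.len tree_matrix ∧
  pvHit tree_matrix head (avoid - 1) ∧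
  ∀ p ∈ PySem.List.pyRange 0 (PySem.List.len tree_matrix) 1, avoid < p → ¬pvHit tree_matrix head p
instance (tree_matrix : List (List Int)) (head : Int) (avoid : Int) : Decidable (D_get_right_most_child tree_matrix head avoid) := by unfold D_get_right_most_child; infer_instance

def Spec_get_right_most_child (tree_matrix : List (List Int)) (head : Int) (avoid : Int) (out : Int) : Prop := ¬ D_get_right_most_child tree_matrix head avoid → out = get_right_most_child_alt tree_matrix head avoid
instance (tree_matrix : List (List Int)) (head : Int) (avoid : Int) (out : Int) : Decidable (Spec_get_right_most_child tree_matrix head avoid out) := by unfold Spec_get_right_most_child; infer_instance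

def pvDiffWitness_get_right_most_child : List (List Int) × Int × Int := ([[-1], [7], [-1]], 0, 2)
def pvDiffWitnessOut_get_right_most_child : Int × Int := (-1, 1)

-- ===== CLAIM (what is proved, stated in full; the proofs are below) =====
def Claim_unchanged_get_right_most_child : Prop := ∀ (tree_matrix : List (List Int)) (head : Int) (avoid : Int), Dom_get_right_most_child tree_matrix head avoid → Pre_get_right_most_child tree_matrix head avoid → Spec_get_right_most_child tree_matrix head avoid (get_right_most_child tree_matrix head avoid)
def Claim_changed_get_right_most_child : Prop := Dom_get_right_most_child (pvDiffWitness_get_right_most_child.1) (pvDiffWitness_get_right_most_child.2.1) (pvDiffWitness_get_right_most_child.2.2) ∧ Pre_get_right_most_child (pvDiffWitness_get_right_most_child.1) (pvDiffWitness_get_right_most_child.2.1) (pvDiffWitness_get_right_most_child.2.2) ∧ D_get_right_most_child (pvDiffWitness_get_right_most_child.1) (pvDiffWitness_get_right_most_child.2.1) (pvDiffWitness_get_right_most_child.2.2) ∧ get_right_most_child (pvDiffWitness_get_right_most_child.1) (pvDiffWitness_get_right_most_child.2.1) (pvDiffWitness_get_right_most_child.2.2) = pvDiffWitnessOut_get_right_most_child.1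 ∧ get_right_most_child_alt (pvDiffWitness_get_right_most_child.1) (pvDiffWitness_get_right_most_child.2.1) (pvDiffWitness_get_right_most_child.2.2) = pvDiffWitnessOut_get_right_most_child.2 ∧ pvDiffWitnessOut_get_right_most_child.1 ≠ pvDiffWitnessOut_get_right_most_child.2
def Claim_exact_get_right_most_child : Prop := ∀ (tree_matrix : List (List Int)) (head : Int) (avoid : Int), Dom_get_right_most_child tree_matrix head avoid → Pre_get_right_most_child tree_matrix head avoid → D_get_right_most_child tree_matrix head avoid → get_right_most_child tree_matrix head avoid ≠ get_right_most_child_alt tree_matrix head avoid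

-- ===== LEMMAS AND PROOFS =====

-- descending first-hit scan WITHOUT the avoid-1 skip: the reference both ports are compared against
def pvMaxC (tree_matrix : List (List Int)) (head avoid p : Int) : Int :=
  if _h : head < p then
    if p ≠ avoid ∧ pvHit tree_matrix head p then p
    else pvMaxC tree_matrix head avoid (p - 1)
  else -1
termination_by (p - head).toNat
decreasing_by omega

theorem pvMaxC_neg (tm : List (List Int)) (head avoid p : Int) (h : p ≤ head) :
    pvMaxC tm head avoid p = -1 := by
  rw [pvMaxC]; rw [dif_neg (by omega)]

-- hit only on in-range (possibly negative, Python-wrapped) row indices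
theorem pvHit_range (tm : List (List Int)) (head p : Int) (h : pvHit tm head p = true) :
    -(tm.length : Int) ≤ p ∧ p < (tm.length : Int) := by
  by_contra hc
  have hnone : PySem.List.pyGet? tm p = none := by
    rw [PySem.List.pyGet?_eq_none_iff]
    simp only [PySem.Raise.InRange]; omega
  have h0 : PySem.List.pyGetD tm p ([] : List Int) = [] := PySem.List.pyGetD_of_none _ _ _ hnone
  rw [pvHit, h0] at h
  simp [PySem.List.pyGetD, PySem.List.pyGet?] at h

-- if some candidate q ≤ p exists then pvMaxC p is itself a candidate, at least q and at most p
theorem pvMaxC_found (tm : List (List Int)) (head avoid : Int) :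
    ∀ p q : Int, head < q → q ≤ p → q ≠ avoid → pvHit tm head q = true →
      head < pvMaxC tm head avoid p ∧ pvMaxC tm head avoid p ≠ avoid ∧
      pvHit tm head (pvMaxC tm head avoid p) = true ∧ q ≤ pvMaxC tm head avoid p ∧
      pvMaxC tm head avoid p ≤ p := by
  intro p
  induction p using pvMaxC.induct tm head avoid with
  | case1 p hp hcand =>
      intro q _ hqp _ _
      rw [pvMaxC, dif_pos hp, if_pos hcand]
      exact ⟨hp, hcand.1, hcand.2, hqp, le_refl _⟩
  | case2 p hp hcand ih =>
      intro q hq hqp hqa hqh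
      have hqne : q ≠ p := by rintro rfl; exact hcand ⟨hqa, hqh⟩
      have h := ih q hq (by omega) hqa hqh
      rw [pvMaxC, dif_pos hp, if_neg hcand]
      exact ⟨h.1, h.2.1, h.2.2.1, h.2.2.2.1, by omega⟩
  | case3 p hp =>
      intro q hq hqp _ _
      omega

-- a negative row index wraps: tm[p] is tm[p + len] for -len ≤ p < 0
theorem pvHit_wrap (tm : List (List Int)) (head p : Int)
    (h1 : -(tm.length : Int) ≤ p) (h2 : p < 0) :
    pvHit tm head p = pvHit tm head (p + tm.length) := by
  unfold pvHit
  have hk : p = -(((-p).toNat : Nat) : Int) := by omega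
  rw [hk, PySem.List.pyGetD_neg_natCast tm (-p).toNat [] (by omega) (by omega),
    PySem.List.pyGetD_eq_getElem tm [] (by omega) (by omega)]
  have hidx : tm.length - (-p).toNat = (-(((-p).toNat : Nat) : Int) + tm.length).toNat := by omega
  simp [hidx]

-- pvMaxC is either the sentinel -1 or a candidate ≤ p
theorem pvMaxC_cases (tm : List (List Int)) (head avoid : Int) :
    ∀ p : Int, pvMaxC tm head avoid p = -1 ∨
      (head < pvMaxC tm head avoid p ∧ pvMaxC tm head avoid p ≠ avoid ∧
       pvHit tm head (pvMaxC tm head avoid p) = true ∧ pvMaxC tm head avoid p ≤ p) := by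
  intro p
  induction p using pvMaxC.induct tm head avoid with
  | case1 p hp hcand =>
      rw [pvMaxC, dif_pos hp, if_pos hcand]
      exact Or.inr ⟨hp, hcand.1, hcand.2, le_refl _⟩
  | case2 p hp hcand ih =>
      rw [pvMaxC, dif_pos hp, if_neg hcand]
      rcases ih with h | h
      · exact Or.inl h
      · exact Or.inr ⟨h.1, h.2.1, h.2.2.1, by omega⟩
  | case3 p hp =>
      rw [pvMaxC, dif_neg hp]
      exact Or.inl rfl

-- skipping a candidate-free stretch
theorem pvMaxC_skip (tm : List (List Int)) (head avoid : Int) :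
    ∀ k : Nat, ∀ p r : Int, p - r = (k : Int) → r ≤ p →
      (∀ q : Int, r < q → q ≤ p → ¬ (q ≠ avoid ∧ pvHit tm head q = true)) →
      pvMaxC tm head avoid p = pvMaxC tm head avoid r := by
  intro k
  induction k with
  | zero =>
      intro p r h _ _
      obtain rfl : p = r := by omega
      rfl
  | succ k ih =>
      intro p r h hrp hno
      have hrp' : r < p := by omega
      by_cases hp : head < p
      · rw [pvMaxC, dif_pos hp, if_neg (hno p hrp' (le_refl _))]
        exact ih (p - 1) r (by omega) (by omega) (fun q h1 h2 => hno q h1 (by omega))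
      · rw [pvMaxC_neg tm head avoid p (by omega), pvMaxC_neg tm head avoid r (by omega)]

-- A's loop versus the reference scan: equal, or the scan has arrived at the skipped row avoid-1
theorem pvGoA_eq (tm : List (List Int)) (head avoid : Int) :
    ∀ p : Int, pvGoA tm head avoid p = pvMaxC tm head avoid p ∨
      (avoid ≤ p ∧ head < avoid - 1 ∧ pvHit tm head (avoid - 1) = true ∧
       pvMaxC tm head avoid p = avoid - 1 ∧
       pvGoA tm head avoid p = pvMaxC tm head avoid (avoid - 2)) := by
  intro p
  induction p using pvGoA.induct tm head avoid with
  | case1 hp ih =>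
      -- p = avoid, A double-decrements
      rw [pvGoA, dif_pos hp, if_pos rfl]
      have hm : pvMaxC tm head avoid avoid = pvMaxC tm head avoid (avoid - 1) := by
        rw [pvMaxC, dif_pos hp, if_neg (by simp)]
      by_cases hb : head < avoid - 1 ∧ pvHit tm head (avoid - 1) = true
      · have hm1 : pvMaxC tm head avoid (avoid - 1) = avoid - 1 := by
          rw [pvMaxC, dif_pos hb.1, if_pos ⟨by omega, hb.2⟩]
        refine Or.inr ⟨le_refl _, hb.1, hb.2, by rw [hm, hm1], ?_⟩
        rcases ih with h | h
        · exact h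
        · omega
      · -- row avoid-1 is not a candidate anyway
        have hm1 : pvMaxC tm head avoid (avoid - 1) = pvMaxC tm head avoid (avoid - 2) := by
          by_cases hh : head < avoid - 1
          · rw [pvMaxC, dif_pos hh, if_neg (by intro hc; exact hb ⟨hh, hc.2⟩)]
            rw [show avoid - 1 - 1 = avoid - 2 by ring]
          · rw [pvMaxC_neg tm head avoid (avoid - 1) (by omega),
                pvMaxC_neg tm head avoid (avoid - 2) (by omega)]
        rcases ih with h | h
        · exact Or.inl (by rw [hm, hm1, h])
        · omega
  | case2 p hp hpav hhit =>
      rw [pvGoA, dif_pos hp, if_neg hpav, if_pos hhit]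
      rw [pvMaxC, dif_pos hp, if_pos ⟨hpav, hhit⟩]
      exact Or.inl rfl
  | case3 p hp hpav hhit ih =>
      rw [pvGoA, dif_pos hp, if_neg hpav, if_neg hhit]
      have hm : pvMaxC tm head avoid p = pvMaxC tm head avoid (p - 1) := by
        rw [pvMaxC, dif_pos hp, if_neg (by intro hc; exact hhit hc.2)]
      rcases ih with h | h
      · exact Or.inl (by rw [hm, h])
      · exact Or.inr ⟨by omega, h.2.1, h.2.2.1, by rw [hm, h.2.2.2.1], h.2.2.2.2⟩
  | case4 p hp =>
      rw [pvGoA, dif_neg hp, pvMaxC_neg tm head avoid p (by omega)]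
      exact Or.inl rfl

-- under the D_ conditions A's loop lands exactly on pvMaxC (avoid - 2)
theorem pvGoA_D (tm : List (List Int)) (head avoid : Int)
    (hha : head < avoid - 1) :
    ∀ p : Int, avoid ≤ p →
      (∀ q : Int, avoid - 1 < q → q ≤ p → q ≠ avoid → pvHit tm head q = false) →
      pvGoA tm head avoid p = pvMaxC tm head avoid (avoid - 2) := by
  intro p
  induction p using pvGoA.induct tm head avoid with
  | case1 hp ih =>
      intro _ _
      rw [pvGoA, dif_pos hp, if_pos rfl]
      rcases pvGoA_eq tm head avoid (avoid - 2) with h | h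
      · exact h
      · omega
  | case2 p hp hpav hhit =>
      intro hav hno
      rw [hno p (by omega) (le_refl _) hpav] at hhit
      exact absurd hhit (by simp)
  | case3 p hp hpav hhit ih =>
      intro hav hno
      have hpav' : avoid < p := by
        rcases lt_or_eq_of_le hav with h | h
        · exact h
        · exact absurd h.symm hpav
      rw [pvGoA, dif_pos hp, if_neg hpav, if_neg hhit]
      exact ih (by omega) (fun q h1 h2 h3 => hno q h1 (by omega) h3)
  | case4 p hp =>
      intro hav _; omega

-- max(l ++ [x]) = x when every element of l is ≤ x
theorem pvFoldl_max_le (x : Int) : ∀ (l : List Int) (a : Int), a ≤ x → (∀ y ∈ l, y ≤ x) →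
    l.foldl max a ≤ x := by
  intro l
  induction l with
  | nil => intro a ha _; simpa using ha
  | cons b t ih =>
      intro a ha hl
      simp only [List.foldl_cons]
      exact ih (max a b) (by simp [ha, hl b (by simp)]) (fun y hy => hl y (by simp [hy]))

theorem pvMax?_append_last (l : List Int) (x : Int) (h : ∀ y ∈ l, y ≤ x) :
    PySem.List.max? (l ++ [x]) (fun y => y) = some x := by
  cases l with
  | nil => simp [PySem.List.max?_id_cons]
  | cons a t =>
      rw [List.cons_append, PySem.List.max?_id_cons]
      congr 1
      rw [List.foldl_append]
      simp only [List.foldl_cons, List.foldl_nil]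
      have hle : t.foldl max a ≤ x :=
        pvFoldl_max_le x t a (h a (by simp)) (fun y hy => h y (by simp [hy]))
      omega

-- B's comprehension + max equals the reference scan
theorem pvB_eq_maxC (tm : List (List Int)) (head avoid : Int) :
    ∀ k : Nat, ∀ t : Int, (t - head).toNat = k →
      (match PySem.List.max?
          ((PySem.List.pyRange (head + 1) t 1).filter
            (fun p => p != avoid && pvHit tm head p)) (fun y => y) with
        | some m => m
        | none => -1) = pvMaxC tm head avoid (t - 1) := by
  intro k
  induction k with
  | zero =>
      intro t ht
      rw [PySem.List.pyRange_one_eq_nil (by omega)]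
      rw [pvMaxC_neg tm head avoid (t - 1) (by omega)]
      simp [PySem.List.max?]
  | succ k ih =>
      intro t ht
      by_cases h1 : t ≤ head + 1
      · rw [PySem.List.pyRange_one_eq_nil (by omega)]
        rw [pvMaxC_neg tm head avoid (t - 1) (by omega)]
        simp [PySem.List.max?]
      · have hsplit : PySem.List.pyRange (head + 1) t 1 =
            PySem.List.pyRange (head + 1) (t - 1) 1 ++ [t - 1] := by
          have h2 := PySem.List.pyRange_one_succ_right (a := head + 1) (b := t - 1) (by omega)
          rw [show t - 1 + 1 = t by ring] at h2
          exact h2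
        rw [hsplit, List.filter_append]
        cases hc : ((t - 1 : Int) != avoid && pvHit tm head (t - 1)) with
        | true =>
            simp only [List.filter_cons, List.filter_nil, hc, if_pos trivial]
            rw [pvMax?_append_last _ _ (by
              intro y hy
              have hm := List.mem_of_mem_filter hy
              rw [PySem.List.mem_pyRange_one] at hm
              omega)]
            rw [pvMaxC, dif_pos (show head < t - 1 by omega)]
            rw [if_pos (by
              rw [Bool.and_eq_true, bne_iff_ne] at hc
              exact ⟨hc.1, hc.2⟩)]
        | false =>
            simp only [List.filter_cons, List.filter_nil, hc, Bool.false_eq_true,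
              if_false, List.append_nil]
            have hrec := ih (t - 1) (by omega)
            rw [show t - 1 - 1 = t - 2 by ring] at hrec
            have hstep : pvMaxC tm head avoid (t - 1) = pvMaxC tm head avoid (t - 2) := by
              rw [pvMaxC, dif_pos (show head < t - 1 by omega)]
              rw [if_neg (by
                intro hcc
                rw [Bool.and_eq_false_iff] at hc
                rcases hc with h | h
                · rw [bne_eq_false_iff_eq] at h; exact hcc.1 h
                · rw [hcc.2] at h; exact absurd h (by simp))]
              rw [show t - 1 - 1 = t - 2 by ring]
            rw [hrec, hstep]

-- the two closed forms, instantiated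
theorem pvAlt_eq (tm : List (List Int)) (head avoid : Int) :
    get_right_most_child_alt tm head avoid = pvMaxC tm head avoid ((tm.length : Int) - 1) :=
  pvB_eq_maxC tm head avoid (((tm.length : Int) - head).toNat) (tm.length : Int) rfl

-- unpacked form of D_: over all Int row indices of the scan (negative ones wrap)
theorem pvD_iff (tm : List (List Int)) (head avoid : Int) :
    D_get_right_most_child tm head avoid ↔
      (avoid ≠ 0 ∧ head < avoid - 1 ∧ avoid < (tm.length : Int) ∧ pvHit tm head (avoid - 1) = true ∧
       ∀ p : Int, avoid < p → p < (tm.length : Int) → pvHit tm head p = false) := by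
  unfold D_get_right_most_child
  simp only [PySem.List.len_eq]
  constructor
  · rintro ⟨h0, h1, h2, h3, h4⟩
    refine ⟨h0, h1, h2, h3, ?_⟩
    intro p hp1 hp2
    cases hx : pvHit tm head p
    · rfl
    · exfalso
      have hr := pvHit_range tm head p hx
      by_cases hneg : p < 0
      · rw [pvHit_wrap tm head p (by omega) hneg] at hx
        have := h4 (p + tm.length)
          (by rw [PySem.List.mem_pyRange_one]; omega) (by omega)
        simp [hx] at this
      · have := h4 p (by rw [PySem.List.mem_pyRange_one]; omega) (by omega)
        simp [hx] at this
  · rintro ⟨h0, h1, h2, h3, h4⟩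
    refine ⟨h0, h1, h2, h3, ?_⟩
    intro p hmem hp
    rw [PySem.List.mem_pyRange_one] at hmem
    simp [h4 p hp (by omega)]

-- what Pre_ gives the degenerate skip corner: len = 1, avoid = 0 forces head ≥ -2
-- (for head ≤ -3 the scan reads tm[-2], which raises in Python)
theorem pvPre_head (tm : List (List Int)) (head : Int)
    (hlen : tm.length = 1) (hPre : Pre_get_right_most_child tm head 0) : -2 ≤ head := by
  by_contra hc
  have hL : (tm.length : Int) = 1 := by rw [hlen]; rfl
  obtain ⟨-, h2⟩ := hPre
  rw [hL] at h2
  obtain ⟨q, hq, hqa, hqs, -⟩ := h2 (by rw [if_neg (by omega), if_neg (by omega)]; omega)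
  rw [PySem.List.mem_pyRange_one] at hq
  have hq1 : q = -1 ∨ q = 0 := by omega
  rcases hq1 with rfl | rfl
  · exact hqs ⟨by omega, by rw [hL]; omega⟩
  · exact hqa rfl

-- ===== VERDICT (by name: the statement is the Claim_ definition above) =====
theorem get_right_most_child_spec : Claim_unchanged_get_right_most_child := by
  intro tm head avoid _ hPre
  unfold Spec_get_right_most_child
  intro hD
  rw [pvAlt_eq]
  unfold get_right_most_child
  rcases pvGoA_eq tm head avoid ((tm.length : Int) - 1) with h | ⟨hav, hha, hhit, hmx, hgo⟩
  · exact h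
  -- the scan arrived at the skipped row avoid-1: all of D_ except possibly avoid ≠ 0 holds
  · have hno : ∀ p : Int, avoid < p → p < (tm.length : Int) → pvHit tm head p = false := by
      intro p hp1 hp2
      cases hx : pvHit tm head p
      · rfl
      · have := pvMaxC_found tm head avoid ((tm.length : Int) - 1) p (by omega) (by omega) (by omega) hx
        omega
    rw [pvD_iff] at hD
    have hav0 : avoid = 0 := by
      by_contra hc
      exact hD ⟨hc, hha, by omega, hhit, hno⟩
    -- avoid = 0: the skipped row is -1; under Pre_ this forces len = 1, head = -2, and both sides are -1
    subst hav0
    have hr := pvHit_range tm head _ hhit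
    have hn1 : (tm.length : Int) = 1 := by
      by_contra hc
      have hn2 : (2 : Int) ≤ (tm.length : Int) := by omega
      rw [pvHit_wrap tm head (0 - 1) (by omega) (by omega)] at hhit
      have := hno (0 - 1 + tm.length) (by omega) (by omega)
      rw [this] at hhit
      exact absurd hhit (by simp)
    have hlow : -2 ≤ head := pvPre_head tm head (by omega) hPre
    rw [hgo, hmx, pvMaxC_neg tm head 0 (0 - 2 : Int) (by omega)]
    norm_num

theorem get_right_most_child_changed : Claim_changed_get_right_most_child := by
  unfold Claim_changed_get_right_most_child
  refine ⟨by decide, by decide, by decide, ?_, by decide, by decide⟩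
  show get_right_most_child [[-1], [7], [-1]] 0 2 = -1
  unfold get_right_most_child
  rw [pvGoA]; norm_num
  rw [pvGoA]; norm_num

theorem get_right_most_child_tight : Claim_exact_get_right_most_child := by
  intro tm head avoid _ _ hD
  rw [pvD_iff] at hD
  obtain ⟨h0, h1, h2, h3, h4⟩ := hD
  rw [pvAlt_eq]
  unfold get_right_most_child
  have hA : pvGoA tm head avoid ((tm.length : Int) - 1) = pvMaxC tm head avoid (avoid - 2) := by
    apply pvGoA_D tm head avoid h1 _ (by omega)
    intro q hq1 hq2 hq3
    have hq4 : avoid < q := by omega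
    exact h4 q hq4 (by omega)
  have hB : pvMaxC tm head avoid ((tm.length : Int) - 1) = avoid - 1 := by
    have hskip := pvMaxC_skip tm head avoid (((tm.length : Int) - 1 - (avoid - 1)).toNat)
      ((tm.length : Int) - 1) (avoid - 1) (by omega) (by omega)
      (by
        rintro q hq1 hq2 ⟨hq3, hq4⟩
        have : avoid < q := by omega
        rw [h4 q this (by omega)] at hq4
        exact absurd hq4 (by simp))
    rw [hskip, pvMaxC, dif_pos h1, if_pos ⟨by omega, h3⟩]
  rw [hA, hB]
  rcases pvMaxC_cases tm head avoid (avoid - 2) with h | ⟨_, _, _, hle⟩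
  · rw [h]; omega
  · omega
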